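-- pv_equiv track=rewrite | github.com/gasamtools/gasamTOOLS_website | apps/fi_tradingview_lightweight_charts/functions_indicators_tm.py | filter_same_start_timestamp
-- ===== SOURCE A (Python) =====
-- def filter_same_start_timestamp(modes_info):
--     seen = {}  # Dictionary to track time_start and the best entry index
--     result = modes_info[:]  # Create a copy to avoid modifying the original list during iteration
--
--     for i, entry in enumerate(modes_info):
--         if "time_start" in entry and "time_end" in entry:
--             time_start = entry["time_start"]
--             time_end = entry["time_end"]
--
--             # If the time_start already exists in seen, compare durations
--             if time_start in seen:
--                 existing_index = seen[time_start]["index"]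
--                 existing_time_end = seen[time_start]["time_end"]
--
--                 if time_end > existing_time_end:
--                     # Replace the previous record with None and update seen
--                     result[existing_index] = None
--                     seen[time_start] = {"index": i, "time_end": time_end}
--                 elif time_end <= existing_time_end:
--                     # Mark the current entry as None, keep the first one
--                     result[i] = None
--             else:
--                 # Store the index and time_end for this time_start
--                 seen[time_start] = {"index": i, "time_end": time_end}
--
--     # Remove `None` entries from the result
--     filtered_result = [entry for entry in result if entry is not None]
--
--     return filtered_result
-- ===== SOURCE B (Python) =====
-- def filter_same_start_timestamp(modes_info):
--     # Brute-force per-entry test: a keyed entry survives iff no keyed entry with the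
--     # same time_start strictly beats it (a later time_end, or the same time_end at an
--     # earlier position); keyless entries always pass through.
--     def keyed(e):
--         return "time_start" in e and "time_end" in e
--
--     def beaten(i, ts, te):
--         return any(
--             keyed(f) and f["time_start"] == ts and
--             (f["time_end"] > te or (f["time_end"] == te and j < i))
--             for j, f in enumerate(modes_info))
--
--     return [e for i, e in enumerate(modes_info)
--             if not keyed(e) or not beaten(i, e["time_start"], e["time_end"])]
-- ===== Notes on version B (the rewrite author's own statement) =====
-- stated objective: alternative
-- what changed: B removes A's dict of per-start winners and its None-tombstoned copy entirely: it decides each entry independently by a quantified scan over the whole list (an entry survives iff no same-start entry strictly beats it on time_end, ties going to the earlier index), trading A's single stateful pass for a stateless nested-scan formulation.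
import Mathlib
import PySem

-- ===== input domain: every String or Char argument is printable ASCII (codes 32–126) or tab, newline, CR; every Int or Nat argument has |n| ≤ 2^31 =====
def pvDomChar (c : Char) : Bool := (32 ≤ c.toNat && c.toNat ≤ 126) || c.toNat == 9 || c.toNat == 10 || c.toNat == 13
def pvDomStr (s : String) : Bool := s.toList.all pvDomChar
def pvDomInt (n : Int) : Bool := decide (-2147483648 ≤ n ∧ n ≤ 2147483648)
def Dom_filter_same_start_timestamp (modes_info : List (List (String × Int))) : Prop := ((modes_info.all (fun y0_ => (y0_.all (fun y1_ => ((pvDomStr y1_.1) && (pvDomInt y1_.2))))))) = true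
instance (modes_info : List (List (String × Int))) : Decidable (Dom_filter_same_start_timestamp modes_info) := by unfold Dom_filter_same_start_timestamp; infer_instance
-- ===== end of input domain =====

-- B replaces A's stateful dict-and-tombstone pass by a stateless per-entry quantified scan
-- (keep a keyed entry iff no same-start entry strictly beats it); objective: alternative.


-- ===== PORT A =====
-- '"k" in entry' / 'entry["k"]' on an input dict (association list): first-match lookup
def pvLookup (entry : List (String × Int)) (k : String) : Option Int :=
  (PySem.Dict.mk entry).get? k

-- the loop body of A; seen's value dict {"index": i, "time_end": te} (two fixed literal keys)
-- is modeled as the pair (i, te); st.2 is 'result', a copy with removed entries set to None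
def pvStepA (st : PySem.Dict Int (Int × Int) × List (Option (List (String × Int))))
    (p : Int × List (String × Int)) :
    PySem.Dict Int (Int × Int) × List (Option (List (String × Int))) :=
  match pvLookup p.2 "time_start", pvLookup p.2 "time_end" with
  | some ts, some te =>
    match st.1.get? ts with
    | some ex =>
      if te > ex.2 then (st.1.insert ts (p.1, te), st.2.set ex.1.toNat none)
      else (st.1, st.2.set p.1.toNat none)   -- 'elif time_end <= existing_time_end' is the only other case
    | none => (st.1.insert ts (p.1, te), st.2)
  | _, _ => st

def filter_same_start_timestamp (modes_info : List (List (String × Int))) : List (List (String × Int)) :=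
  (((PySem.List.enumerate modes_info).foldl pvStepA
      (PySem.Dict.empty, modes_info.map some)).2).filterMap id

-- ===== PORT B =====
-- the generator condition of B's 'any': entry (j, f) beats the keyed entry at index i with (ts, te)
def pvBeats (i ts te : Int) (p : Int × List (String × Int)) : Bool :=
  match pvLookup p.2 "time_start", pvLookup p.2 "time_end" with
  | some ts', some te' => ts' == ts && (decide (te' > te) || (te' == te && decide (p.1 < i)))
  | _, _ => false

def filter_same_start_timestamp_alt (modes_info : List (List (String × Int))) : List (List (String × Int)) :=
  (PySem.List.enumerate modes_info).filterMap (fun p =>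
    match pvLookup p.2 "time_start", pvLookup p.2 "time_end" with
    | some ts, some te =>
      if (PySem.List.enumerate modes_info).any (pvBeats p.1 ts te) then none else some p.2
    | _, _ => some p.2)

-- ===== PRECONDITION & SPEC =====
def Spec_filter_same_start_timestamp (modes_info : List (List (String × Int))) (out : List (List (String × Int))) : Prop := out = filter_same_start_timestamp_alt modes_info
instance (modes_info : List (List (String × Int))) (out : List (List (String × Int))) : Decidable (Spec_filter_same_start_timestamp modes_info out) := by unfold Spec_filter_same_start_timestamp; infer_instance

-- ===== CLAIM (what is proved, stated in full; the proofs are below) =====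
def Claim_equal_filter_same_start_timestamp : Prop := ∀ (modes_info : List (List (String × Int))), Dom_filter_same_start_timestamp modes_info → Spec_filter_same_start_timestamp modes_info (filter_same_start_timestamp modes_info)

-- ===== LEMMAS AND PROOFS =====

-- proof-side abstraction of A's dict evolution (first component of pvStepA)
def pvStepB' (best : PySem.Dict Int (Int × Int)) (p : Int × List (String × Int)) :
    PySem.Dict Int (Int × Int) :=
  match pvLookup p.2 "time_start", pvLookup p.2 "time_end" with
  | some ts, some te =>
    match best.get? ts with
    | some ex => if te > ex.2 then best.insert ts (p.1, te) else best
    | none => best.insert ts (p.1, te)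
  | _, _ => best

-- A's fold carries exactly this dict in its first component
lemma foldA_fst (es : List (Int × List (String × Int)))
    (s : PySem.Dict Int (Int × Int)) (r : List (Option (List (String × Int)))) :
    (es.foldl pvStepA (s, r)).1 = es.foldl pvStepB' s := by
  induction es generalizing s r with
  | nil => rfl
  | cons p es ih =>
    have hstep : (pvStepA (s, r) p).1 = pvStepB' s p := by
      unfold pvStepA pvStepB'
      cases hts : pvLookup p.2 "time_start" with
      | none => rfl
      | some ts =>
        cases hte : pvLookup p.2 "time_end" with
        | none => rfl
        | some te =>
          simp only
          cases hg : PySem.Dict.get? s ts with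
          | none => rfl
          | some ex => simp only; split <;> rfl
    simp only [List.foldl_cons]
    calc (List.foldl pvStepA (pvStepA (s, r) p) es).1
        = (List.foldl pvStepA (pvStepB' s p, (pvStepA (s, r) p).2) es).1 := by rw [← hstep]
      _ = _ := ih _ _

-- what entry i of result looks like after the loop: alive iff it is the final winner for its start
def pvAlive (s : PySem.Dict Int (Int × Int)) (p : Int × List (String × Int)) :
    Option (List (String × Int)) :=
  match pvLookup p.2 "time_start", pvLookup p.2 "time_end" with
  | some ts, some te => if s.get? ts = some (p.1, te) then some p.2 else none
  | _, _ => some p.2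

-- every stored (ts ↦ (i, te)) points back at a keyed entry i of L with exactly those timestamps
def pvGood (L : List (List (String × Int))) (s : PySem.Dict Int (Int × Int)) : Prop :=
  ∀ ts i v, s.get? ts = some (i, v) →
    ∃ h : i.toNat < L.length, i = (i.toNat : Int) ∧
      pvLookup (L[i.toNat]'h) "time_start" = some ts ∧ pvLookup (L[i.toNat]'h) "time_end" = some v

lemma pvGood_append (M : List (List (String × Int))) (x : List (String × Int))
    (s : PySem.Dict Int (Int × Int)) (h : pvGood M s) : pvGood (M ++ [x]) s := by
  intro ts i v hg
  obtain ⟨hlt, hnn, h1, h2⟩ := h ts i v hg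
  have hlt' : i.toNat < (M ++ [x]).length := by simp; omega
  refine ⟨hlt', hnn, ?_, ?_⟩ <;> rwa [List.getElem_append_left hlt]

lemma pvGood_insert (M : List (List (String × Int))) (x : List (String × Int))
    (s : PySem.Dict Int (Int × Int)) (hgood : pvGood M s) (ts te : Int)
    (hts : pvLookup x "time_start" = some ts) (hte : pvLookup x "time_end" = some te) :
    pvGood (M ++ [x]) (s.insert ts ((M.length : Int), te)) := by
  intro ts' i v hg'
  by_cases h : ts' = ts
  · subst h
    rw [PySem.Dict.get?_insert_self] at hg'
    have h' : ((M.length : Int), te) = (i, v) := by injection hg'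
    injection h' with hi hv
    subst hi hv
    have hlen : ((M.length : Int)).toNat = M.length := Int.toNat_natCast M.length
    have hlt' : ((M.length : Int)).toNat < (M ++ [x]).length := by simp [hlen]
    refine ⟨hlt', by simp [hlen], ?_, ?_⟩ <;>
      · rw [List.getElem_concat_length hlen]; assumption
  · rw [PySem.Dict.get?_insert_of_ne _ _ h] at hg'
    exact pvGood_append M x s hgood ts' i v hg'

-- unfolding lemmas for pvAlive
lemma pvAlive_keyed (s : PySem.Dict Int (Int × Int)) (p : Int × List (String × Int)) (ts te : Int)
    (h1 : pvLookup p.2 "time_start" = some ts) (h2 : pvLookup p.2 "time_end" = some te) :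
    pvAlive s p = if s.get? ts = some (p.1, te) then some p.2 else none := by
  unfold pvAlive; rw [h1, h2]

lemma pvAlive_not_keyed (s : PySem.Dict Int (Int × Int)) (p : Int × List (String × Int))
    (h : pvLookup p.2 "time_start" = none ∨ pvLookup p.2 "time_end" = none) :
    pvAlive s p = some p.2 := by
  unfold pvAlive
  rcases h with h | h
  · rw [h]
  · rw [h]; cases pvLookup p.2 "time_start" <;> rfl

lemma pvNeHelp (ex : Int × Int) (c d : Int) (h : ex.1 ≠ c) :
    (some ex : Option (Int × Int)) ≠ some (c, d) := by
  intro hcon; apply h; injection hcon with h2; rw [h2]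

-- inserting the new winner (index = M.length) rewrites exactly the evicted slot of the alive map
lemma pvMapAlive_insert (M : List (List (String × Int))) (s : PySem.Dict Int (Int × Int))
    (hgood : pvGood M s) (ts te : Int) :
    (PySem.List.enumerate M 0).map (pvAlive (s.insert ts ((M.length : Int), te)))
      = (match s.get? ts with
         | none => (PySem.List.enumerate M 0).map (pvAlive s)
         | some ex => ((PySem.List.enumerate M 0).map (pvAlive s)).set ex.1.toNat none) := by
  have hptw : ∀ (k : Nat) (hk : k < M.length),
      (∀ v, s.get? ts = some v → v.1.toNat ≠ k) →
      pvAlive (s.insert ts ((M.length : Int), te)) ((0 : Int) + (k : Int), M[k]'hk)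
        = pvAlive s ((0 : Int) + (k : Int), M[k]'hk) := by
    intro k hk hnot
    cases hts' : pvLookup (M[k]'hk) "time_start" with
    | none => rw [pvAlive_not_keyed _ _ (Or.inl hts'), pvAlive_not_keyed _ _ (Or.inl hts')]
    | some tsk =>
      cases hte' : pvLookup (M[k]'hk) "time_end" with
      | none => rw [pvAlive_not_keyed _ _ (Or.inr hte'), pvAlive_not_keyed _ _ (Or.inr hte')]
      | some tek =>
        rw [pvAlive_keyed _ _ _ _ hts' hte', pvAlive_keyed _ _ _ _ hts' hte']
        by_cases htsk : tsk = ts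
        · subst htsk
          rw [PySem.Dict.get?_insert_self]
          rw [if_neg (by simp [Prod.ext_iff]; omega)]
          cases hg : s.get? tsk with
          | none => rw [if_neg (by simp)]
          | some ex =>
            have hx := hnot ex hg
            obtain ⟨hlt, hnn, -, -⟩ := hgood tsk ex.1 ex.2 (by rw [hg])
            rw [if_neg (pvNeHelp _ _ _ (by simp; omega))]
        · rw [PySem.Dict.get?_insert_of_ne _ _ htsk]
  cases hg : s.get? ts with
  | none =>
    apply List.map_congr_left
    intro p hp
    obtain ⟨k, hk, rfl⟩ := (PySem.List.mem_enumerate_iff M 0 p).1 hp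
    exact hptw k hk (fun v hv => by rw [hg] at hv; cases hv)
  | some ex =>
    obtain ⟨hlt, hnn, hts0, hte0⟩ := hgood ts ex.1 ex.2 (by rw [hg])
    apply List.ext_getElem
    · simp
    intro j h1 h2
    rw [List.getElem_set]
    simp only [List.getElem_map, PySem.List.getElem_enumerate]
    by_cases hj : ex.1.toNat = j
    · rw [if_pos hj]
      subst hj
      rw [pvAlive_keyed _ _ _ _ hts0 hte0, PySem.Dict.get?_insert_self]
      rw [if_neg (by simp [Prod.ext_iff]; omega)]
    · rw [if_neg hj]
      have h1' : j < M.length := by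
        simpa [PySem.List.length_enumerate] using h1
      exact hptw j h1' (fun v hv => by rw [hg] at hv; injection hv with hv'; rw [← hv']; exact hj)

lemma pvMain (L : List (List (String × Int))) :
    (((PySem.List.enumerate L 0).foldl pvStepB' PySem.Dict.empty).keys.Nodup) ∧
    pvGood L ((PySem.List.enumerate L 0).foldl pvStepB' PySem.Dict.empty) ∧
    ∀ t, ((PySem.List.enumerate L 0).foldl pvStepA (PySem.Dict.empty, L.map some ++ t)).2
      = (PySem.List.enumerate L 0).map
          (pvAlive ((PySem.List.enumerate L 0).foldl pvStepB' PySem.Dict.empty)) ++ t := by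
  induction L using List.reverseRecOn with
  | nil =>
    refine ⟨PySem.Dict.nodup_keys_empty, ?_, ?_⟩
    · intro ts i v h
      simp [PySem.List.enumerate_nil, PySem.Dict.get?_empty] at h
    · intro t
      rfl
  | append_singleton M x ih =>
    obtain ⟨hnd, hgood, hres⟩ := ih
    have hq : PySem.List.enumerate (M ++ [x]) 0
        = PySem.List.enumerate M 0 ++ [((M.length : Int), x)] := by
      rw [PySem.List.enumerate_append, PySem.List.enumerate_cons, PySem.List.enumerate_nil]
      norm_num
    set E := PySem.List.enumerate M 0 with hE
    set sM := E.foldl pvStepB' PySem.Dict.empty with hsM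
    have hfoldB : (PySem.List.enumerate (M ++ [x]) 0).foldl pvStepB' PySem.Dict.empty
        = pvStepB' sM ((M.length : Int), x) := by
      rw [hq, List.foldl_append]
      rfl
    have hinner : ∀ t, E.foldl pvStepA (PySem.Dict.empty, M.map some ++ t)
        = (sM, E.map (pvAlive sM) ++ t) := by
      intro t
      have h1 := foldA_fst E PySem.Dict.empty (M.map some ++ t)
      have h2 := hres t
      rw [← hsM] at h1
      exact Prod.ext h1 h2
    have hresgoal : ∀ t,
        ((PySem.List.enumerate (M ++ [x]) 0).foldl pvStepA
            (PySem.Dict.empty, (M ++ [x]).map some ++ t)).2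
          = (pvStepA (sM, E.map (pvAlive sM) ++ (some x :: t)) ((M.length : Int), x)).2 := by
      intro t
      rw [hq, show (M ++ [x]).map some ++ t = M.map some ++ (some x :: t) by simp,
        List.foldl_append, hinner (some x :: t)]
      rfl
    rw [hfoldB, hq]
    simp only [hq] at hresgoal
    cases hts : pvLookup x "time_start" with
    | none =>
      have hsA : ∀ r, pvStepA (sM, r) ((M.length : Int), x) = (sM, r) := by
        intro r; unfold pvStepA; rw [hts]
      have hsB : pvStepB' sM ((M.length : Int), x) = sM := by
        unfold pvStepB'; rw [hts]
      rw [hsB]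
      refine ⟨hnd, pvGood_append M x sM hgood, ?_⟩
      intro t
      rw [hresgoal t, hsA]
      simp only [List.map_append, List.map_cons, List.map_nil]
      rw [pvAlive_not_keyed sM _ (Or.inl hts)]
      simp
    | some ts =>
      cases hte : pvLookup x "time_end" with
      | none =>
        have hsA : ∀ r, pvStepA (sM, r) ((M.length : Int), x) = (sM, r) := by
          intro r; unfold pvStepA; rw [hts, hte]
        have hsB : pvStepB' sM ((M.length : Int), x) = sM := by
          unfold pvStepB'; rw [hts, hte]
        rw [hsB]
        refine ⟨hnd, pvGood_append M x sM hgood, ?_⟩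
        intro t
        rw [hresgoal t, hsA]
        simp only [List.map_append, List.map_cons, List.map_nil]
        rw [pvAlive_not_keyed sM _ (Or.inr hte)]
        simp
      | some te =>
        cases hg : sM.get? ts with
        | none =>
          have hsA : ∀ r, pvStepA (sM, r) ((M.length : Int), x)
              = (sM.insert ts ((M.length : Int), te), r) := by
            intro r; unfold pvStepA; rw [hts, hte]; simp only [hg]
          have hsB : pvStepB' sM ((M.length : Int), x) = sM.insert ts ((M.length : Int), te) := by
            unfold pvStepB'; rw [hts, hte]; simp only [hg]
          rw [hsB]
          refine ⟨PySem.Dict.nodup_keys_insert sM ts _ hnd,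
            pvGood_insert M x sM hgood ts te hts hte, ?_⟩
          intro t
          rw [hresgoal t, hsA]
          simp only [List.map_append, List.map_cons, List.map_nil]
          rw [pvAlive_keyed _ _ ts te hts hte, PySem.Dict.get?_insert_self, if_pos rfl]
          rw [pvMapAlive_insert M sM hgood ts te]
          simp only [hg]
          simp [hE]
        | some ex =>
          obtain ⟨hlt, hnn, -, -⟩ := hgood ts ex.1 ex.2 (by rw [hg])
          by_cases hcmp : te > ex.2
          · have hsA : ∀ r, pvStepA (sM, r) ((M.length : Int), x)
                = (sM.insert ts ((M.length : Int), te), r.set ex.1.toNat none) := by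
              intro r; unfold pvStepA; rw [hts, hte]; simp only [hg]; rw [if_pos hcmp]
            have hsB : pvStepB' sM ((M.length : Int), x)
                = sM.insert ts ((M.length : Int), te) := by
              unfold pvStepB'; rw [hts, hte]; simp only [hg]; rw [if_pos hcmp]
            rw [hsB]
            refine ⟨PySem.Dict.nodup_keys_insert sM ts _ hnd,
              pvGood_insert M x sM hgood ts te hts hte, ?_⟩
            intro t
            rw [hresgoal t, hsA]
            simp only [List.map_append, List.map_cons, List.map_nil]
            rw [pvAlive_keyed _ _ ts te hts hte, PySem.Dict.get?_insert_self, if_pos rfl]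
            rw [pvMapAlive_insert M sM hgood ts te]
            simp only [hg]
            rw [List.set_append, if_pos (by simp [hE]; omega)]
            simp [hE]
          · have hsA : ∀ r, pvStepA (sM, r) ((M.length : Int), x)
                = (sM, r.set ((M.length : Int)).toNat none) := by
              intro r; unfold pvStepA; rw [hts, hte]; simp only [hg]; rw [if_neg hcmp]
            have hsB : pvStepB' sM ((M.length : Int), x) = sM := by
              unfold pvStepB'; rw [hts, hte]; simp only [hg]; rw [if_neg hcmp]
            rw [hsB]
            refine ⟨hnd, pvGood_append M x sM hgood, ?_⟩
            intro t
            rw [hresgoal t, hsA]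
            simp only [List.map_append, List.map_cons, List.map_nil]
            rw [pvAlive_keyed _ _ ts te hts hte, hg,
              if_neg (pvNeHelp _ _ _ (by simp; omega))]
            rw [List.set_append, if_neg (by simp [hE])]
            simp [hE]

-- the fold dict stores, per key, exactly the scan-winner of B's criterion
def pvWinner (L : List (List (String × Int))) (s : PySem.Dict Int (Int × Int)) : Prop :=
  ∀ ts : Int,
    (∀ i te, s.get? ts = some (i, te) →
      ∀ p ∈ PySem.List.enumerate L 0, ∀ te', pvLookup p.2 "time_start" = some ts →
        pvLookup p.2 "time_end" = some te' → (te' < te ∨ (te' = te ∧ i ≤ p.1))) ∧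
    (s.get? ts = none →
      ∀ p ∈ PySem.List.enumerate L 0, ∀ te', pvLookup p.2 "time_start" = some ts →
        pvLookup p.2 "time_end" = some te' → False)

lemma pvWin (L : List (List (String × Int))) :
    pvWinner L ((PySem.List.enumerate L 0).foldl pvStepB' PySem.Dict.empty) := by
  induction L using List.reverseRecOn with
  | nil =>
    intro ts
    constructor
    · intro i te h
      simp [PySem.List.enumerate_nil, PySem.Dict.get?_empty] at h
    · intro _ p hp
      simp [PySem.List.enumerate_nil] at hp
  | append_singleton M x ih =>
    obtain ⟨-, hgood, -⟩ := pvMain M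
    have hq : PySem.List.enumerate (M ++ [x]) 0
        = PySem.List.enumerate M 0 ++ [((M.length : Int), x)] := by
      rw [PySem.List.enumerate_append, PySem.List.enumerate_cons, PySem.List.enumerate_nil]
      norm_num
    set sM := (PySem.List.enumerate M 0).foldl pvStepB' PySem.Dict.empty with hsM
    have hfoldB : (PySem.List.enumerate (M ++ [x]) 0).foldl pvStepB' PySem.Dict.empty
        = pvStepB' sM ((M.length : Int), x) := by
      rw [hq, List.foldl_append]
      rfl
    rw [hfoldB]
    have hmem : ∀ p, p ∈ PySem.List.enumerate (M ++ [x]) 0 ↔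
        p ∈ PySem.List.enumerate M 0 ∨ p = ((M.length : Int), x) := by
      intro p
      rw [hq]
      simp
    -- when the appended entry is not keyed the dict and the keyed population are unchanged
    have hskip : ∀ (hsB : pvStepB' sM ((M.length : Int), x) = sM),
        (∀ te', pvLookup x "time_end" = some te' → pvLookup x "time_start" = none) →
        pvWinner (M ++ [x]) (pvStepB' sM ((M.length : Int), x)) := by
      intro hsB hnk
      rw [hsB]
      intro ts0
      constructor
      · intro i te h p hp te' hpts hpte
        rcases (hmem p).1 hp with hp' | hp'
        · exact (ih ts0).1 i te h p hp' te' hpts hpte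
        · rw [hp'] at hpts hpte
          rw [hnk te' hpte] at hpts
          cases hpts
      · intro h p hp te' hpts hpte
        rcases (hmem p).1 hp with hp' | hp'
        · exact (ih ts0).2 h p hp' te' hpts hpte
        · rw [hp'] at hpts hpte
          rw [hnk te' hpte] at hpts
          cases hpts
    cases hts : pvLookup x "time_start" with
    | none =>
      exact hskip (by unfold pvStepB'; rw [hts]) (fun _ _ => hts)
    | some ts =>
      cases hte : pvLookup x "time_end" with
      | none =>
        refine hskip (by unfold pvStepB'; rw [hts, hte]) (fun te' hte' => ?_)
        rw [hte] at hte'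
        cases hte'
      | some te =>
        -- common argument for the two branches that insert (M.length, te) at key ts
        have hins : ∀ (hsB : pvStepB' sM ((M.length : Int), x)
              = sM.insert ts ((M.length : Int), te)),
            (∀ q ∈ PySem.List.enumerate M 0, ∀ te', pvLookup q.2 "time_start" = some ts →
              pvLookup q.2 "time_end" = some te' → te' < te) →
            pvWinner (M ++ [x]) (pvStepB' sM ((M.length : Int), x)) := by
          intro hsB hdom
          rw [hsB]
          intro ts0
          by_cases hts0 : ts0 = ts
          · subst hts0
            constructor
            · intro i te0 h p hp te' hpts hpte
              rw [PySem.Dict.get?_insert_self] at h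
              injection h with h'
              obtain ⟨h1, h2⟩ := Prod.mk.inj h'
              subst h1 h2
              rcases (hmem p).1 hp with hp' | hp'
              · exact Or.inl (hdom p hp' te' hpts hpte)
              · rw [hp'] at hpte
                rw [hte] at hpte
                injection hpte with hpte'
                right
                refine ⟨hpte'.symm, ?_⟩
                rw [hp']
            · intro h
              rw [PySem.Dict.get?_insert_self] at h
              cases h
          · rw [PySem.Dict.get?_insert_of_ne _ _ hts0]
            constructor
            · intro i te0 h p hp te' hpts hpte
              rcases (hmem p).1 hp with hp' | hp'
              · exact (ih ts0).1 i te0 h p hp' te' hpts hpte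
              · rw [hp'] at hpts
                rw [hts] at hpts
                injection hpts with hpts'
                exact absurd hpts'.symm hts0
            · intro h p hp te' hpts hpte
              rcases (hmem p).1 hp with hp' | hp'
              · exact (ih ts0).2 h p hp' te' hpts hpte
              · rw [hp'] at hpts
                rw [hts] at hpts
                injection hpts with hpts'
                exact absurd hpts'.symm hts0
        cases hg : sM.get? ts with
        | none =>
          refine hins (by unfold pvStepB'; rw [hts, hte]; simp only [hg]) ?_
          intro q hq te' hqts hqte
          exact absurd ((ih ts).2 hg q hq te' hqts hqte) (fun h => h)
        | some ex =>
          by_cases hcmp : te > ex.2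
          · refine hins (by unfold pvStepB'; rw [hts, hte]; simp only [hg]; rw [if_pos hcmp]) ?_
            intro q hq te' hqts hqte
            have := (ih ts).1 ex.1 ex.2 (by rw [hg]) q hq te' hqts hqte
            omega
          · have hsB : pvStepB' sM ((M.length : Int), x) = sM := by
              unfold pvStepB'; rw [hts, hte]; simp only [hg]; rw [if_neg hcmp]
            rw [hsB]
            intro ts0
            constructor
            · intro i te0 h p hp te' hpts hpte
              rcases (hmem p).1 hp with hp' | hp'
              · exact (ih ts0).1 i te0 h p hp' te' hpts hpte
              · rw [hp'] at hpts hpte ⊢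
                rw [hts] at hpts
                rw [hte] at hpte
                injection hpts with hpts'
                injection hpte with hpte'
                subst hpts'
                rw [hg] at h
                injection h with h'
                obtain ⟨h1, h2⟩ := Prod.mk.inj h'
                subst h1 h2
                obtain ⟨hlt, hnn, -, -⟩ := hgood _ ex.1 ex.2 hg
                subst hpte'
                rcases lt_or_eq_of_le (by omega : te ≤ ex.2) with hlt' | heq
                · exact Or.inl hlt'
                · exact Or.inr ⟨heq, by simp only; omega⟩
            · intro h p hp te' hpts hpte
              rcases (hmem p).1 hp with hp' | hp'
              · exact (ih ts0).2 h p hp' te' hpts hpte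
              · rw [hp'] at hpts
                rw [hts] at hpts
                injection hpts with hpts'
                subst hpts'
                rw [hg] at h
                cases h

-- ===== VERDICT (by name: the statement is the Claim_ definition above) =====
theorem filter_same_start_timestamp_spec : Claim_equal_filter_same_start_timestamp := by
  unfold Claim_equal_filter_same_start_timestamp
  intro L _
  unfold Spec_filter_same_start_timestamp filter_same_start_timestamp filter_same_start_timestamp_alt
  obtain ⟨hnd, hgood, hres⟩ := pvMain L
  have hwin := pvWin L
  have hres0 := hres []
  rw [List.append_nil, List.append_nil] at hres0
  rw [hres0]
  set s := (PySem.List.enumerate L 0).foldl pvStepB' PySem.Dict.empty with hs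
  rw [List.filterMap_map]
  apply List.filterMap_congr
  intro p hp
  obtain ⟨k, hk, rfl⟩ := (PySem.List.mem_enumerate_iff L 0 p).1 hp
  simp only [Function.comp_apply, id_eq]
  cases hts : pvLookup (L[k]'hk) "time_start" with
  | none =>
    rw [pvAlive_not_keyed _ _ (Or.inl hts)]
  | some ts =>
    cases hte : pvLookup (L[k]'hk) "time_end" with
    | none =>
      rw [pvAlive_not_keyed _ _ (Or.inr hte)]
    | some te =>
      rw [pvAlive_keyed _ _ ts te hts hte]
      dsimp only
      have hiff : s.get? ts = some (((0 : Int) + (k : Int)), te) ↔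
          ¬ (PySem.List.enumerate L 0).any (pvBeats ((0 : Int) + (k : Int)) ts te) = true := by
        constructor
        · intro h hc
          obtain ⟨q, hq, hbq⟩ := List.any_eq_true.1 hc
          unfold pvBeats at hbq
          cases hqts : pvLookup q.2 "time_start" with
          | none => rw [hqts] at hbq; cases hbq
          | some ts' =>
            cases hqte : pvLookup q.2 "time_end" with
            | none => rw [hqts, hqte] at hbq; cases hbq
            | some te' =>
              rw [hqts, hqte] at hbq
              simp only [Bool.and_eq_true, Bool.or_eq_true, beq_iff_eq, decide_eq_true_eq] at hbq
              obtain ⟨hts', hrest⟩ := hbq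
              subst hts'
              have := (hwin _).1 _ _ h q hq te' hqts hqte
              omega
        · intro hnone
          cases hg : s.get? ts with
          | none =>
            exact absurd ((hwin ts).2 hg _ hp te hts hte) (fun h => h)
          | some ex =>
            obtain ⟨hlt, hnn, hts2, hte2⟩ := hgood ts ex.1 ex.2 (by rw [hg])
            -- the winner's own enumerate element is not beaten
            have hqmem : ((0 : Int) + (ex.1.toNat : Int), L[ex.1.toNat]'hlt) ∈
                PySem.List.enumerate L 0 :=
              (PySem.List.mem_enumerate_iff L 0 _).2 ⟨ex.1.toNat, hlt, rfl⟩
            have hnb : pvBeats ((0 : Int) + (k : Int)) ts te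
                ((0 : Int) + (ex.1.toNat : Int), L[ex.1.toNat]'hlt) = false := by
              by_contra hcon
              exact hnone (List.any_eq_true.2 ⟨_, hqmem, by
                cases hb : pvBeats ((0 : Int) + (k : Int)) ts te
                    ((0 : Int) + (ex.1.toNat : Int), L[ex.1.toNat]'hlt) with
                | false => exact absurd hb hcon
                | true => rfl⟩)
            unfold pvBeats at hnb
            rw [hts2, hte2] at hnb
            simp only [Bool.and_eq_false_iff, Bool.or_eq_false_iff,
              decide_eq_false_iff_not, beq_eq_false_iff_ne, ne_eq, not_lt] at hnb
            -- hnb: ¬(ts = ts) ∨ (ex.2 ≤ te ∧ (ex.2 ≠ te ∨ k ≤ ex.1.toNat)) — extract bounds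
            have hk1 := (hwin ts).1 ex.1 ex.2 (by rw [hg]) _ hp te hts hte
            dsimp only at hk1
            congr 1
            rcases hnb with hnb | ⟨hle, hnb2⟩
            · exact absurd trivial hnb
            · have hte_eq : ex.2 = te := by omega
              have hidx : ex.1 = (0 : Int) + (k : Int) := by
                rcases hnb2 with hne | hkle
                · exact absurd hte_eq hne
                · omega
              exact Prod.ext hidx hte_eq
      by_cases hwink : s.get? ts = some (((0 : Int) + (k : Int)), te)
      · rw [if_pos hwink, if_neg (hiff.1 hwink)]
      · rw [if_neg hwink, if_pos (by by_contra hc; exact hwink (hiff.2 hc))]
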